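-- pv_equiv track=rewrite | github.com/JT-ZW/supplier-registration | backend/app/core/profile_permissions.py | separate_changes_by_permission
-- ===== SOURCE A (Python) =====
-- from typing import Set, Dict, Any
-- from enum import Enum
--
-- class FieldPermissionLevel(str, Enum):
--     """Permission levels for profile fields."""
--     DIRECT = "direct"  # Vendor can update directly
--     APPROVAL_REQUIRED = "approval_required"  # Requires admin approval
--     READ_ONLY = "read_only"  # Cannot be changed
--
-- DIRECT_UPDATE_FIELDS: Set[str] = {
--     "contact_person_name",
--     "contact_person_title",
--     "phone",
--     "website",
--     "street_address",
--     "city",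
--     "state_province",
--     "postal_code",
--     "country",
-- }
--
-- APPROVAL_REQUIRED_FIELDS: Set[str] = {
--     "company_name",
--     "email",
--     "tax_id",
--     "registration_number",
--     "business_category",
--     "years_in_business",
-- }
--
-- def get_field_permission(field_name: str) -> FieldPermissionLevel:
--     """
--     Get the permission level for a specific field.
--
--     Args:
--         field_name: Name of the field
--
--     Returns:
--         FieldPermissionLevel enum value
--     """
--     if field_name in DIRECT_UPDATE_FIELDS:
--         return FieldPermissionLevel.DIRECT
--     elif field_name in APPROVAL_REQUIRED_FIELDS:
--         return FieldPermissionLevel.APPROVAL_REQUIRED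
--     else:
--         return FieldPermissionLevel.READ_ONLY
--
-- def separate_changes_by_permission(
--     requested_changes: Dict[str, Any]
-- ) -> Dict[str, Dict[str, Any]]:
--     """
--     Separate requested changes into direct updates and approval-required changes.
--
--     Args:
--         requested_changes: Dictionary of field names to new values
--
--     Returns:
--         Dictionary with 'direct', 'approval_required', and 'rejected' keys
--     """
--     result = {
--         "direct": {},
--         "approval_required": {},
--         "rejected": {},
--     }
--
--     for field, value in requested_changes.items():
--         permission = get_field_permission(field)
--
--         if permission == FieldPermissionLevel.DIRECT:
--             result["direct"][field] = value
--         elif permission == FieldPermissionLevel.APPROVAL_REQUIRED: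
--             result["approval_required"][field] = value
--         else:  # READ_ONLY
--             result["rejected"][field] = value
--
--     return result
-- ===== SOURCE B (Python) =====
-- DIRECT_UPDATE_FIELDS = {
--     "contact_person_name",
--     "contact_person_title",
--     "phone",
--     "website",
--     "street_address",
--     "city",
--     "state_province",
--     "postal_code",
--     "country",
-- }
--
-- APPROVAL_REQUIRED_FIELDS = {
--     "company_name",
--     "email",
--     "tax_id",
--     "registration_number",
--     "business_category",
--     "years_in_business",
-- }
--
--
-- def separate_changes_by_permission(requested_changes):
--     return {
--         "direct": {f: v for f, v in requested_changes.items()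
--                    if f in DIRECT_UPDATE_FIELDS},
--         "approval_required": {f: v for f, v in requested_changes.items()
--                               if f in APPROVAL_REQUIRED_FIELDS},
--         "rejected": {f: v for f, v in requested_changes.items()
--                      if f not in DIRECT_UPDATE_FIELDS
--                      and f not in APPROVAL_REQUIRED_FIELDS},
--     }
-- ===== Notes on version B (the rewrite author's own statement) =====
-- stated objective: simpler
-- what changed: Replaces the single dispatching loop with per-permission-level helper calls over three independent dict comprehensions, each filtering requested_changes.items() by a direct set-membership test (no per-item permission lookup/branch chain), assembling the three-key result literal in one expression.
import Mathlib
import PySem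

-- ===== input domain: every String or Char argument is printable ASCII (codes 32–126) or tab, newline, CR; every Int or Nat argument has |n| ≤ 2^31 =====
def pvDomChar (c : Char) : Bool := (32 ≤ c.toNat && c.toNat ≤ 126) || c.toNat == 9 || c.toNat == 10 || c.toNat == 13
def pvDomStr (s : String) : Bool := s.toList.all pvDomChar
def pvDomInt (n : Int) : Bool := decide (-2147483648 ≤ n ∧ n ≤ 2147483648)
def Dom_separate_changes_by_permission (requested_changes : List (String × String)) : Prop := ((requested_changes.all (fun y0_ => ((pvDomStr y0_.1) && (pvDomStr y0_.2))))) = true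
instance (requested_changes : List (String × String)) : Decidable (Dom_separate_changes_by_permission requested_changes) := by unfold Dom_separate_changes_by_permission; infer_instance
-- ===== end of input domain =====

-- B builds the three buckets by three independent membership-filter comprehensions instead of A's single dispatching loop with a per-item permission lookup (simpler decomposition; same O(n) cost).


-- ===== PORT A =====
def DIRECT_UPDATE_FIELDS : PySem.Set String := PySem.Set.ofList
  ["contact_person_name", "contact_person_title", "phone", "website",
   "street_address", "city", "state_province", "postal_code", "country"]

def APPROVAL_REQUIRED_FIELDS : PySem.Set String := PySem.Set.ofList
  ["company_name", "email", "tax_id", "registration_number",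
   "business_category", "years_in_business"]

def get_field_permission (field_name : String) : String :=
  if PySem.Set.contains DIRECT_UPDATE_FIELDS field_name then "direct"
  else if PySem.Set.contains APPROVAL_REQUIRED_FIELDS field_name then "approval_required"
  else "read_only"

def separate_changes_by_permission (requested_changes : List (String × String)) : List (String × List (String × String)) :=
  let result :=
    requested_changes.foldl
      (fun (r : PySem.Dict String String × PySem.Dict String String × PySem.Dict String String) fv =>
        let permission := get_field_permission fv.1
        if permission == "direct" then (r.1.insert fv.1 fv.2, r.2.1, r.2.2)
        else if permission == "approval_required" then (r.1, r.2.1.insert fv.1 fv.2, r.2.2)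
        else (r.1, r.2.1, r.2.2.insert fv.1 fv.2))
      (PySem.Dict.empty, PySem.Dict.empty, PySem.Dict.empty)
  [("direct", result.1.items), ("approval_required", result.2.1.items), ("rejected", result.2.2.items)]

-- ===== PORT B =====
def separate_changes_by_permission_alt (requested_changes : List (String × String)) : List (String × List (String × String)) :=
  [("direct",
      (PySem.Dict.ofList (requested_changes.filter
        (fun fv => PySem.Set.contains DIRECT_UPDATE_FIELDS fv.1))).items),
   ("approval_required",
      (PySem.Dict.ofList (requested_changes.filter
        (fun fv => PySem.Set.contains APPROVAL_REQUIRED_FIELDS fv.1))).items),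
   ("rejected",
      (PySem.Dict.ofList (requested_changes.filter
        (fun fv => !PySem.Set.contains DIRECT_UPDATE_FIELDS fv.1
                   && !PySem.Set.contains APPROVAL_REQUIRED_FIELDS fv.1))).items)]

-- ===== PRECONDITION & SPEC =====
def Spec_separate_changes_by_permission (requested_changes : List (String × String)) (out : List (String × List (String × String))) : Prop := out = separate_changes_by_permission_alt requested_changes
instance (requested_changes : List (String × String)) (out : List (String × List (String × String))) : Decidable (Spec_separate_changes_by_permission requested_changes out) := by unfold Spec_separate_changes_by_permission; infer_instance

-- ===== CLAIM (what is proved, stated in full; the proofs are below) =====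
def Claim_equal_separate_changes_by_permission : Prop := ∀ (requested_changes : List (String × String)), Dom_separate_changes_by_permission requested_changes → Spec_separate_changes_by_permission requested_changes (separate_changes_by_permission requested_changes)

-- ===== LEMMAS AND PROOFS =====

-- the two field sets are disjoint
theorem direct_not_approval (f : String) (h : PySem.Set.contains DIRECT_UPDATE_FIELDS f = true) :
    PySem.Set.contains APPROVAL_REQUIRED_FIELDS f = false := by
  simp [DIRECT_UPDATE_FIELDS, PySem.Set.contains, PySem.Set.ofList, PySem.Set.add,
        PySem.Set.empty, List.contains_eq_mem] at h
  rcases h with rfl | rfl | rfl | rfl | rfl | rfl | rfl | rfl | rfl <;> decide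

-- A's dispatching fold equals B's three filtered dict-builds, generalized over accumulators
theorem fold_eq_filters (xs : List (String × String))
    (d1 d2 d3 : PySem.Dict String String) :
    xs.foldl
      (fun (r : PySem.Dict String String × PySem.Dict String String × PySem.Dict String String) fv =>
        let permission := get_field_permission fv.1
        if permission == "direct" then (r.1.insert fv.1 fv.2, r.2.1, r.2.2)
        else if permission == "approval_required" then (r.1, r.2.1.insert fv.1 fv.2, r.2.2)
        else (r.1, r.2.1, r.2.2.insert fv.1 fv.2))
      (d1, d2, d3)
    = ((xs.filter (fun fv => PySem.Set.contains DIRECT_UPDATE_FIELDS fv.1)).foldl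
         (fun acc p => acc.insert p.1 p.2) d1,
       (xs.filter (fun fv => PySem.Set.contains APPROVAL_REQUIRED_FIELDS fv.1)).foldl
         (fun acc p => acc.insert p.1 p.2) d2,
       (xs.filter (fun fv => !PySem.Set.contains DIRECT_UPDATE_FIELDS fv.1
                   && !PySem.Set.contains APPROVAL_REQUIRED_FIELDS fv.1)).foldl
         (fun acc p => acc.insert p.1 p.2) d3) := by
  induction xs generalizing d1 d2 d3 with
  | nil => rfl
  | cons fv xs ih =>
    by_cases hD : PySem.Set.contains DIRECT_UPDATE_FIELDS fv.1 = true
    · have hA := direct_not_approval fv.1 hD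
      simp only [List.foldl_cons, List.filter_cons, get_field_permission, hD, hA]
      simp only [reduceIte, String.reduceBEq, beq_self_eq_true, Bool.not_true, Bool.not_false,
        Bool.and_true, Bool.false_eq_true, List.foldl_cons]
      exact ih _ _ _
    · have hD' : PySem.Set.contains DIRECT_UPDATE_FIELDS fv.1 = false := by
        exact Bool.eq_false_iff.mpr hD
      by_cases hA : PySem.Set.contains APPROVAL_REQUIRED_FIELDS fv.1 = true
      · simp only [List.foldl_cons, List.filter_cons, get_field_permission, hD', hA]
        simp only [reduceIte, String.reduceBEq, beq_self_eq_true, Bool.not_true, Bool.not_false,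
          Bool.and_false, Bool.false_eq_true, List.foldl_cons]
        exact ih _ _ _
      · have hA' : PySem.Set.contains APPROVAL_REQUIRED_FIELDS fv.1 = false := by
          exact Bool.eq_false_iff.mpr hA
        simp only [List.foldl_cons, List.filter_cons, get_field_permission, hD', hA']
        simp only [reduceIte, String.reduceBEq, Bool.not_false, Bool.and_true, Bool.false_eq_true,
          List.foldl_cons]
        exact ih _ _ _

-- ===== VERDICT (by name: the statement is the Claim_ definition above) =====
theorem separate_changes_by_permission_spec : Claim_equal_separate_changes_by_permission := by
  intro rc _
  unfold Spec_separate_changes_by_permission separate_changes_by_permission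
    separate_changes_by_permission_alt
  simp only [fold_eq_filters]
  rfl
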